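-- pv_equiv track=rewrite | github.com/hurto123/Checkmate_Vision | src/vision/detector.py | grid_to_fen
-- ===== SOURCE A (Python) =====
-- def grid_to_fen(grid):
--     """
--     Convert 8x8 grid to FEN position string.
--     """
--     fen_rows = []
--
--     for row in grid:
--         fen_row = ""
--         empty_count = 0
--
--         for cell in row:
--             if cell is None:
--                 empty_count += 1
--             else:
--                 if empty_count > 0:
--                     fen_row += str(empty_count)
--                     empty_count = 0
--                 fen_row += cell
--
--         if empty_count > 0:
--             fen_row += str(empty_count)
--
--         fen_rows.append(fen_row)
--
--     # Join rows with '/'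
--     position = "/".join(fen_rows)
--
--     # Add default game state (white to move, all castling rights, no en passant)
--     # In a real system, you'd track these separately
--     fen = f"{position} w KQkq - 0 1"
--
--     return fen
-- ===== SOURCE B (Python) =====
-- def grid_to_fen(grid):
--     """
--     Convert 8x8 grid to FEN position string.
--
--     Run-based decomposition: each row is split recursively into maximal runs
--     of empty (None) or occupied cells; an empty run becomes its length, an
--     occupied run becomes the concatenation of its pieces.
--     """
--     def row_fen(row):
--         if not row:
--             return ""
--         b = row[0] is None
--         k = 1
--         while k < len(row) and (row[k] is None) == b:
--             k += 1
--         head = str(k) if b else "".join(row[:k])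
--         return head + row_fen(row[k:])
--
--     return "/".join(row_fen(row) for row in grid) + " w KQkq - 0 1"
-- ===== Notes on version B (the rewrite author's own statement) =====
-- stated objective: alternative
-- what changed: Replaces A's character-by-character loop with a deferred empty_count accumulator and flush branches by a run-based decomposition: each row is recursively split into maximal runs of None / piece cells, an empty run rendered as its length and a piece run as the concatenation of its pieces.
import Mathlib
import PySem

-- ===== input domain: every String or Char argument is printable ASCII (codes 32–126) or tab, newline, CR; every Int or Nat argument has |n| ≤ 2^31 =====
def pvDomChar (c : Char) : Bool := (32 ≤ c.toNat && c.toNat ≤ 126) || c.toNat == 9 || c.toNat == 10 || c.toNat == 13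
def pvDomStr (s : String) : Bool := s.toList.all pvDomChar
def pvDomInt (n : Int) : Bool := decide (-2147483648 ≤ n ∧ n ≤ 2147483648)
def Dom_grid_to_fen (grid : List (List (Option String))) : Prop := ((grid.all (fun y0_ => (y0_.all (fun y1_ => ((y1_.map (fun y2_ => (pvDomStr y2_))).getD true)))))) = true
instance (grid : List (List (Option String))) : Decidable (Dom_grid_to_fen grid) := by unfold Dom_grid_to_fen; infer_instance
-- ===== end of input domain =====

-- B replaces A's deferred empty-counter loop by a run-based row decomposition (alternative, same cost).

-- ===== PORT A =====
def grid_to_fen (grid : List (List (Option String))) : String :=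
  let fen_rows := grid.foldl (fun acc row =>
    let st := row.foldl (fun (p : String × Int) cell =>
      match cell with
      | none => (p.1, p.2 + 1)
      | some c =>
        let s := if p.2 > 0 then p.1 ++ PySem.Int.toStr p.2 else p.1
        (s ++ c, 0)) ("", 0)
    let fen_row := if st.2 > 0 then st.1 ++ PySem.Int.toStr st.2 else st.1
    acc ++ [fen_row]) ([] : List String)
  let position := PySem.Str.join "/" fen_rows
  position ++ " w KQkq - 0 1"

-- ===== PORT B =====
-- row_fen from Source B: peel one maximal run (of None-cells or of piece-cells) and recurse on the rest.
def pvRowFen : List (Option String) → String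
  | [] => ""
  | c :: rest =>
    let b := c.isNone
    let g := rest.takeWhile (fun x => x.isNone == b)
    let rest' := rest.dropWhile (fun x => x.isNone == b)
    let head := if b then PySem.Int.toStr ((1 + g.length : Nat) : Int)
                else PySem.Str.join "" ((c :: g).map (fun x => x.getD ""))
    head ++ pvRowFen rest'
  termination_by row => row.length
  decreasing_by
    simp only [List.length_cons]
    exact Nat.lt_succ_of_le (List.length_dropWhile_le _ _)

def grid_to_fen_alt (grid : List (List (Option String))) : String :=
  PySem.Str.join "/" (grid.map pvRowFen) ++ " w KQkq - 0 1"

-- ===== PRECONDITION & SPEC =====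
def Spec_grid_to_fen (grid : List (List (Option String))) (out : String) : Prop := out = grid_to_fen_alt grid
instance (grid : List (List (Option String))) (out : String) : Decidable (Spec_grid_to_fen grid out) := by unfold Spec_grid_to_fen; infer_instance

-- ===== CLAIM (what is proved, stated in full; the proofs are below) =====
def Claim_equal_grid_to_fen : Prop := ∀ (grid : List (List (Option String))), Dom_grid_to_fen grid → Spec_grid_to_fen grid (grid_to_fen grid)

-- ===== LEMMAS AND PROOFS =====

-- canonical rendering of a row given k pending empty squares
def pvCanon : Nat → List (Option String) → String
  | k, [] => if 0 < k then PySem.Int.toStr (k : Int) else ""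
  | k, none :: t => pvCanon (k + 1) t
  | k, some p :: t => (if 0 < k then PySem.Int.toStr (k : Int) else "") ++ p ++ pvCanon 0 t

lemma pvARow_eq (row : List (Option String)) : ∀ (s : String) (k : Nat),
    (let st := row.foldl (fun (p : String × Int) cell =>
      match cell with
      | none => (p.1, p.2 + 1)
      | some c =>
        let s := if p.2 > 0 then p.1 ++ PySem.Int.toStr p.2 else p.1
        (s ++ c, 0)) (s, (k : Int))
     if st.2 > 0 then st.1 ++ PySem.Int.toStr st.2 else st.1)
    = s ++ pvCanon k row := by
  induction row with
  | nil =>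
    intro s k
    simp only [List.foldl_nil, pvCanon]
    split_ifs with h1 h2 h2 <;> simp_all
  | cons c t ih =>
    intro s k
    cases c with
    | none =>
      have hcast : (k : Int) + 1 = ((k + 1 : Nat) : Int) := by push_cast; ring
      simp only [List.foldl_cons, pvCanon, hcast]
      exact ih s (k + 1)
    | some p =>
      simp only [List.foldl_cons, pvCanon]
      have h0 := ih ((if (k : Int) > 0 then s ++ PySem.Int.toStr (k : Int) else s) ++ p) 0
      simp only [Int.natCast_zero] at h0
      rw [h0]
      split_ifs with h1 h2 h2 <;> simp_all [String.append_assoc]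

lemma pvCanon_nones (g : List (Option String)) (hg : ∀ x ∈ g, x = none) :
    ∀ (k : Nat) (t : List (Option String)), pvCanon k (g ++ t) = pvCanon (k + g.length) t := by
  induction g with
  | nil => intro k t; simp
  | cons x g' ih =>
    intro k t
    have hx : x = none := hg x (by simp)
    subst hx
    have h := ih (fun y hy => hg y (by simp [hy])) (k + 1) t
    simp only [List.cons_append, pvCanon, h, List.length_cons]
    congr 1
    omega

lemma pvCanon_flush (k : Nat) (hk : 0 < k) (t : List (Option String))
    (ht : t = [] ∨ ∃ p t', t = some p :: t') :
    pvCanon k t = PySem.Int.toStr (k : Int) ++ pvCanon 0 t := by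
  rcases ht with rfl | ⟨p, t', rfl⟩
  · simp [pvCanon, hk]
  · simp [pvCanon, hk, String.append_assoc]

lemma pvJoin_empty_cons (a : String) (l : List String) :
    PySem.Str.join "" (a :: l) = a ++ PySem.Str.join "" l := by
  apply String.toList_inj.mp
  cases l with
  | nil => simp [PySem.Str.toList_join, PySem.Chars.join, List.intercalate]
  | cons b l' => simp [PySem.Str.toList_join, PySem.Chars.join, List.intercalate]

lemma pvCanon_somes (g : List (Option String)) (hg : ∀ x ∈ g, x.isSome) :
    ∀ t : List (Option String), pvCanon 0 (g ++ t) =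
      PySem.Str.join "" (g.map (fun x => x.getD "")) ++ pvCanon 0 t := by
  induction g with
  | nil =>
    intro t
    have : PySem.Str.join "" ([] : List String) = "" := by decide
    simp [this]
  | cons x g' ih =>
    intro t
    obtain ⟨p, rfl⟩ := Option.isSome_iff_exists.mp (hg x (by simp))
    have h := ih (fun y hy => hg y (by simp [hy])) t
    simp only [List.cons_append, pvCanon, h, List.map_cons, Option.getD_some, pvJoin_empty_cons]
    simp [String.append_assoc]

lemma pvDropWhile_head_cases {α : Type} (p : α → Bool) (l : List α) :
    l.dropWhile p = [] ∨ ∃ x t, l.dropWhile p = x :: t ∧ p x = false := by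
  induction l with
  | nil => left; rfl
  | cons a l' ih =>
    by_cases h : p a
    · simpa [List.dropWhile, h] using ih
    · right; exact ⟨a, l', by simp [List.dropWhile, h], by simp [h]⟩

lemma pvRowFen_eq_canon (n : Nat) : ∀ row : List (Option String),
    row.length ≤ n → pvRowFen row = pvCanon 0 row := by
  induction n with
  | zero =>
    intro row h
    have : row = [] := List.length_eq_zero_iff.mp (Nat.le_zero.mp h)
    subst this; simp [pvRowFen, pvCanon]
  | succ m ih =>
    intro row hlen
    cases row with
    | nil => simp [pvRowFen, pvCanon]
    | cons c rest =>
      have hsplit : rest.takeWhile (fun x => x.isNone == c.isNone) ++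
          rest.dropWhile (fun x => x.isNone == c.isNone) = rest :=
        List.takeWhile_append_dropWhile
      have hrest'len : (rest.dropWhile (fun x => x.isNone == c.isNone)).length ≤ m := by
        have := List.length_dropWhile_le (fun x => x.isNone == c.isNone) rest
        simp only [List.length_cons] at hlen
        omega
      have ihr := ih _ hrest'len
      cases c with
      | none =>
        have hg : ∀ x ∈ rest.takeWhile (fun x => x.isNone == (none : Option String).isNone), x = none := by
          intro x hx
          have := List.mem_takeWhile_imp hx
          cases x <;> simp_all
        have hrest' : rest.dropWhile (fun x => x.isNone == (none : Option String).isNone) = [] ∨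
            ∃ p t', rest.dropWhile (fun x => x.isNone == (none : Option String).isNone) = some p :: t' := by
          rcases pvDropWhile_head_cases (fun x => x.isNone == (none : Option String).isNone) rest with h | ⟨x, t, hx, hpx⟩
          · left; exact h
          · cases x with
            | none => simp at hpx
            | some q => right; exact ⟨q, t, hx⟩
        rw [pvRowFen, ihr]
        show PySem.Int.toStr ((1 + _ : Nat) : Int) ++ _ = pvCanon 0 (none :: rest)
        have h1 : pvCanon 0 (none :: rest) = pvCanon 1 rest := rfl
        rw [h1]
        conv_rhs => rw [← hsplit]
        rw [pvCanon_nones _ hg 1 _,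
            pvCanon_flush (1 + (rest.takeWhile (fun x => x.isNone == (none : Option String).isNone)).length)
              (by omega) _ hrest']
      | some q =>
        have hg : ∀ x ∈ rest.takeWhile (fun x => x.isNone == (some q : Option String).isNone), x.isSome := by
          intro x hx
          have := List.mem_takeWhile_imp hx
          cases x <;> simp_all
        rw [pvRowFen, ihr]
        show PySem.Str.join "" ((some q :: _).map (fun x => x.getD "")) ++ _ = pvCanon 0 (some q :: rest)
        have h1 : pvCanon 0 (some q :: rest) = q ++ pvCanon 0 rest := by
          simp [pvCanon]
        rw [h1]
        conv_rhs => rw [← hsplit]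
        rw [pvCanon_somes _ hg _, List.map_cons, Option.getD_some, pvJoin_empty_cons]
        simp [String.append_assoc]

lemma pvFoldl_append {α β : Type} (f : α → β) (l : List α) :
    ∀ acc : List β, l.foldl (fun acc row => acc ++ [f row]) acc = acc ++ l.map f := by
  induction l with
  | nil => intro acc; simp
  | cons a l' ih => intro acc; simp [List.foldl_cons, ih]

-- ===== VERDICT (by name: the statement is the Claim_ definition above) =====
theorem grid_to_fen_spec : Claim_equal_grid_to_fen := by
  intro grid _
  show grid_to_fen grid = grid_to_fen_alt grid
  unfold grid_to_fen grid_to_fen_alt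
  simp only
  rw [pvFoldl_append]
  congr 2
  simp only [List.nil_append]
  apply List.map_congr_left
  intro row _
  have h := pvARow_eq row "" 0
  simp only [Int.natCast_zero] at h
  rw [h, pvRowFen_eq_canon row.length row le_rfl]
  simp
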